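/- GENERATED by tools/from_farm_form.py from prooffarm-gif/accepted/DGifSlurp.6/Lemmas.lean (a worked proof of the farm's unit `DGifSlurp.6`,
   accepted by the verdict) — do not edit. -/
import Gif.Spec.Units.DGifSlurp_6
import Gif.Spec.AllSegs

/-!
  Lemmas for the unit `DGifSlurp.6` (a BODY segment of the protected function `DGifSlurp` with TWO calls: `DGifGetLine(gif, r, n)` for
  the whole raster of a not interlaced image, and on GIF_ERROR `DGifDecreaseImageCounter(gif)`). The segment is walked in TWO STEPS that
  meet at the first call's return address 0x10a7ca (`ret11`); the assertion there is the family's `IR` with the cut `ret11`.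

      seg6_env_at_call     `Env` at a callee's entry for the PRESENT heap `Hc` and forest `Fc` (`Env.at_call` is for the entry's heap)
      seg6_last_imgAt      the last counted slot agrees with the last image of the forest (`Shape.saved`)
      seg6_raster_data     the raster of the last image is a data object of the forest
      seg6_raster_far_pv   the raster and pv are two entries of the owned list: at least 64 bytes apart (FO2)
      seg6_seg_call        0x10a7bd … the call of DGifGetLine … 0x10a7ca: `NI` → `IR` at `ret11`
      seg6_seg_tail        0x10a7ca … 0x10a7d4 (GIF_OK) | … the call of DGifDecreaseImageCounter … 0x10a8ed (GIF_ERROR)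
-/

open X86 X86.User Asan ProgX.Base ProgX.Base.Spec Gif.Spec

set_option maxRecDepth 4000
set_option maxHeartbeats 4000000

namespace Gif.Spec.DGifSlurp_6

/-- **`Env` AT THE ENTRY OF A CALLEE, FOR THE PRESENT HEAP AND FOREST** (`Env.at_call` of FrameCarry.lean with the ghosts that change):
`henv` is the ENTRY's environment (the static facts of `HeapPre`, the context, where the cursor is), `hreg` says the present heap
`Hc` is at the place of the entry's, `hinv` / `hok` are the body's invariants for `Hc`, `Fc` at a memory `mem`, and the callee's entry
state `s` differs from `mem` by stack stores below `top` (the pushed return address). -/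
theorem seg6_env_at_call {H Hc : Heap} {rest : List Obj} {frames : List (Nat × FrameLayout)} {F Fc : Forest} {R : Rd} {e s : State}
    {base top lo : Nat} {Fl : FrameLayout} {mem : Mem} (henv : Env H rest frames F R e) (hreg : SameRegion H Hc)
    (hinv : HeapInv Hc rest ((base, Fl) :: frames) top mem) (hok : GifOK Hc Fc R mem)
    (hs : Mem.SameExcept [⟨lo, top⟩] mem s.mem) (hlo : 0x700000 ≤ lo)
    (hsp : (s.reg .rsp).toNat + 8 ≤ top) (h8 : (s.reg .rsp).toNat % 8 = 0) (hlo' : 0x700000 ≤ (s.reg .rsp).toNat + 8) :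
    Env Hc rest ((base, Fl) :: frames) Fc R s := by
  have hcur := henv.ctx.cursor_range henv.heap.inv.shadow
  have hcur' := (henv.ctx.push base Fl).cursor_range hinv.shadow
  have hhi := hinv.shadow.stack.hi
  have hoff := hinv.heap.offStack
  have hroom := hinv.heap.room
  have hun : ShadowUntouched mem s.mem := by
    apply hs.eqOn
    intro w hw
    have e := List.mem_singleton.mp hw
    rw [e]
    simp only
    omega
  have hinv' : HeapInv Hc rest ((base, Fl) :: frames) ((s.reg .rsp).toNat + 8) s.mem := by
    refine (hinv.sameExcept hun hs ?_).lower hsp (by omega) hlo'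
    intro w hw
    have e := List.mem_singleton.mp hw
    rw [e]
    left
    simp only
    omega
  refine ⟨⟨hinv', hreg.1.trans henv.heap.base, hreg.2.trans henv.heap.limit, henv.heap.text, henv.heap.offText⟩,
    henv.ctx.push base Fl, ?_⟩
  apply hok.sameExcept hinv.heap ⟨hcur.1, hcur.2.1⟩ hs
  intro w hw
  have e := List.mem_singleton.mp hw
  rw [e]
  apply Loose.stack hinv.heap
  · simp only
    omega
  · simp only
    omega
  · simp only
    omega

/-- **The last counted slot agrees with the last image of the forest** (`Shape.saved` at the index `init.length`). -/
theorem seg6_last_imgAt {Fc : Forest} {R : Rd} {mem : Mem} {s : Saved} {init : List Img} {g : Img} (hshape : Shape Fc R mem)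
    (hl : DGifSlurp.Last Fc s init g) : ImgAt (s.arr + 56 * init.length) g mem := by
  have hsv := hshape.saved
  rw [hl.saved] at hsv
  obtain ⟨_, _, _, _, hall⟩ := hsv
  have hlen : init.length < s.imgs.length := by
    rw [hl.imgs, List.length_append, List.length_singleton]
    omega
  have hk := hall init.length hlen
  have e : s.imgs[init.length] = g := by
    simp only [hl.imgs, List.getElem_append_right (Nat.le_refl _), Nat.sub_self, List.getElem_cons_zero]
  rw [e] at hk
  exact hk

/-- **The raster of the last counted image is a data object of the forest.** -/
theorem seg6_raster_data {Fc : Forest} {s : Saved} {init : List Img} {g : Img} {r n : Nat} (hl : DGifSlurp.Last Fc s init g)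
    (hr : g.raster = some (r, n)) : (r, n) ∈ Fc.datas := by
  unfold Forest.datas
  rw [hl.saved]
  apply List.mem_append_left
  apply List.mem_append_right
  unfold Saved.datas
  simp only
  rw [hl.imgs, List.flatMap_append]
  apply List.mem_append_right
  simp only [List.flatMap_cons, List.flatMap_nil, List.append_nil]
  unfold Img.datas
  rw [hr]
  apply List.mem_append_left
  apply List.mem_append_right
  exact List.mem_singleton.mpr rfl

/-- **The raster is far from the private object** [FO2]: a data object of the forest and pv are two entries of the owned list. -/
theorem seg6_raster_far_pv {Hc : Heap} {Fc : Forest} {mem : Mem} {r n : Nat} (howns : Owns Hc Fc.owned) (hok : HeapOK Hc mem)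
    (hd : (r, n) ∈ Fc.datas) : r + n + 64 ≤ Fc.pv ∨ Fc.pv + 24936 + 64 ≤ r := by
  have hne := ((howns.placed hok).structs_ne.2 (r, n) hd).2.1
  have hpv : (Fc.pv, 24936) ∈ Fc.owned := List.mem_cons_of_mem _ List.mem_cons_self
  have hfar := howns.far hok (Fc.datas_owned (r, n) hd) hpv (fun e => hne (congrArg Prod.fst e))
  exact hfar

/-- **10A7BDH … the call of DGifGetLine … 10A7CAH (ret11)** (dgif_lib.c:1259 `DGifGetLine(GifFile, sp->RasterBits, ImageSize)`):
`edx = ebx = ImageSize`, `rsi = r13` = the raster, `rdi = rbp = gif`. -/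
theorem seg6_seg_call (Lay : Layout) (hLay : Lay.hi = 0x1000000) (μ : Microarch) (hμ : UserX.MicroOK μ) (u₀ : State)
    (hcode : HasCodeNat Lay u₀ Gif.L.DGifSlurp.entry Gif.Code.code_DGifSlurp.nat Gif.L.DGifSlurp.size)
    (H : Heap) (rest : List Obj) (frames : List (Nat × FrameLayout)) (F : Forest) (R : Rd) (Hc : Heap) (Fc : Forest) (m : Nat)
    (e : State) (ret : Word)
    (h_DGifGetLine : ∀ (n : Nat), Calls Lay μ ProgX.Base.WayInv (ProgX.Base.conv u₀) Gif.L.DGifGetLine.entry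
      (Gif.Spec.DGifGetLine.spec Hc rest (DGifSlurp.framesIn frames e) Fc R n))
    (v : State) (hat : DGifSlurp.NI H rest frames F R Hc Fc m u₀ e ret v) :
    ReachVia Lay μ ProgX.Base.WayInv v (DGifSlurp.IR Gif.L.DGifSlurp.ret11 H rest frames F R Hc Fc m u₀ e ret) := by
  -- THE PRELUDE: the entry assertion `NI` = `IR` + the raster in `r13`, its size in `ebx`
  obtain ⟨hir, h_r13, h_rbx⟩ := hat
  obtain ⟨hAt, hlz, hlast, hlt⟩ := hir
  obtain ⟨hcore, hreg, hgif, hpv, hinv, hok⟩ := hAt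
  obtain ⟨s, init, g, r, n, hl, hras, h_r12⟩ := hlast
  -- the callee's contract for the frame list of the body, the present heap and forest, and the whole raster
  have hgl := h_DGifGetLine n
  have he := hcore.entry
  v_entry he
  obtain ⟨henv, hrdi, hcomplete⟩ := hcore.pre
  -- what the walker reads of a segment's entry state
  have w_rip := hcore.rip
  have c_rsp : v.reg .rsp = e.reg .rsp - 152 := hcore.rsp
  have c_rbp : v.reg .rbp = e.reg .rdi := hcore.rbp
  have w_kept : RegsKept [.rsp] v v := RegsKept.refl _ _
  have w_eq : Mem.EqOn ProgX.Base.L.textLo ProgX.Base.L.textHi u₀.mem v.mem := ProgX.Base.conv_code_eqOn hcore.code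
  have hdf := (show abiInv _ from hcore.abi).1
  have hmx := (show abiInv _ from hcore.abi).2
  have hsse := ProgX.Base.sseOK_of_abiInv hcore.abi
  -- the slots and the footprint that `Core` at the exit states again
  have k_r15 : v.mem.readLE (e.reg .rsp - 8) 8 = (e.reg .r15).toNat := hcore.slot_r15
  have k_r14 : v.mem.readLE (e.reg .rsp - 16) 8 = (e.reg .r14).toNat := hcore.slot_r14
  have k_r13 : v.mem.readLE (e.reg .rsp - 24) 8 = (e.reg .r13).toNat := hcore.slot_r13
  have k_r12 : v.mem.readLE (e.reg .rsp - 32) 8 = (e.reg .r12).toNat := hcore.slot_r12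
  have k_rbp : v.mem.readLE (e.reg .rsp - 40) 8 = (e.reg .rbp).toNat := hcore.slot_rbp
  have k_rbx : v.mem.readLE (e.reg .rsp - 48) 8 = (e.reg .rbx).toNat := hcore.slot_rbx
  have k_ra : UInt64.ofNat (v.mem.readLE (e.reg .rsp) 8) = ret := hcore.slot_ra
  have hsame : Mem.SameExcept
    [⟨(e.reg .rsp).toNat - 848, (e.reg .rsp).toNat⟩,
     shadowSpan ((e.reg .rsp).toNat - 152) ((e.reg .rsp).toNat - 56),
     ⟨0x800000, 0x1000020⟩,
     ⟨R.cur, R.cur + 8⟩] e.mem v.mem := hcore.same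
  -- THE RASTER (SV4): the last slot's clause of `Shape.saved`: `sp->RasterBits = r`, `n = Width · Height`, both at least 1, `n < 2^31`
  have himg := seg6_last_imgAt hok.shape hl
  have hrat := himg.raster
  rw [hras] at hrat
  obtain ⟨hr1, hr2, hr3, hr4, hr5⟩ := hrat
  simp only at hr1 hr2 hr5
  rw [h_r12] at h_r13 h_rbx
  have e_r13 : (v.reg .r13).toNat = r := h_r13.trans hr1
  have e_rbx : (v.reg .rbx).toNat = n := h_rbx.trans hr2.symm
  have hn1 : 1 ≤ n := by
    rw [hr2]
    exact Nat.mul_le_mul hr3 hr4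
  -- where the cursor, gif, pv and the raster are, as numbers
  have hcur := henv.ctx.cursor_range henv.heap.inv.shadow
  have hbase : Hc.base = 0x800000 := hreg.1.trans henv.heap.base
  have hdat := seg6_raster_data hl hras
  have hrown := Fc.datas_owned (r, n) hdat
  have hrin := hok.owns.inside hinv.heap (o := (r, n)) hrown
  simp only at hrin
  rw [hbase] at hrin
  have hr_lo : 0x800000 + 64 ≤ r := hrin.1
  have hr_hi : r + n + 32 ≤ 0xC00000 := hrin.2.2.2.2
  clear hrin
  have hpin := hok.owns.inside hinv.heap (o := (Fc.pv, 24936)) (List.mem_cons_of_mem _ List.mem_cons_self)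
  simp only at hpin
  rw [hbase, hpv] at hpin
  have hp_lo : 0x800000 + 64 ≤ F.pv := hpin.1
  have hp_hi : F.pv + 24936 + 32 ≤ 0xC00000 := hpin.2.2.2.2
  clear hpin
  have hgin := hok.owns.inside hinv.heap (o := (Fc.gif, 120)) List.mem_cons_self
  simp only at hgin
  rw [hbase, hgif] at hgin
  have hg_lo : 0x800000 + 64 ≤ F.gif := hgin.1
  have hg_hi : F.gif + 120 + 32 ≤ 0xC00000 := hgin.2.2.2.2
  clear hgin
  have hfar := seg6_raster_far_pv hok.owns hinv.heap hdat
  rw [hpv] at hfar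
  -- THE WALK, to the call's return address
  u_walk hcode [hμ.vendor] until [Gif.L.DGifSlurp.ret11] span [ProgX.Base.L.textLo, ProgX.Base.L.textHi] side (v_side)
  case call_inv =>
    v_inv
  case pre_10a7c5 =>
    -- DGifGetLine'S PRECONDITION. The environment for the frame list with the own frame in front: only the return address was
    -- pushed since `v`
    have hs : Mem.SameExcept [⟨(e.reg .rsp).toNat - 848, (e.reg .rsp).toNat - 152⟩] v.mem s_10a7c5.mem := by
      rw [w_mem]
      u_same
    have henv' : Env Hc rest (DGifSlurp.framesIn frames e) Fc R s_10a7c5 := by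
      refine seg6_env_at_call henv hreg hinv hok hs (by omega) ?_ ?_ ?_
      · rw [w_rsp]
        u_omega
      · rw [w_rsp]
        u_omega
      · rw [w_rsp]
        u_omega
    -- the LZW field ranges: the push misses pv
    have hlz' : LZOK s_10a7c5.mem Fc.pv := by
      rw [hpv]
      apply hlz.sameExcept hs (by omega)
      intro w hw
      have ew := List.mem_singleton.mp hw
      rw [ew]
      simp only
      omega
    -- the buffer is the whole raster: a live data object of the forest
    have hbuf : BufOK Hc rest (DGifSlurp.framesIn frames e) Fc R (s_10a7c5.reg .rsi).toNat n := by
      rw [w_rsi, e_r13]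
      refine ⟨?_, ?_, ?_, by omega⟩
      · exact hok.owns.liveIn hrown rest _ (Nat.le_refl _) (Nat.le_refl _)
      · exact Loose.data hinv.heap hok.owns hdat (Nat.le_refl _) (Nat.le_refl _)
      · exact HeapWin.live hinv.heap (hok.owns.live _ hrown) (Nat.le_refl _) (Nat.le_refl _)
    refine ⟨henv', hlz', ?_, ?_, hn1, hr5, hbuf, ?_⟩
    · rw [w_rdi, hgif]
      exact hrdi
    · rw [w_rdx, toNat_ofBV32, toNat_part32, e_rbx]
      omega
    · rw [w_rsi, e_r13, hpv]
      omega
  -- 0x10a7ca (ret11): DGifGetLine HAS RETURNED. Its post: the same heap and forest, `LZOK`, a boolean in `eax`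
  obtain ⟨hback, hlz1, _hbool⟩ := w_post
  -- the reader at DGifGetLine's entry is the one at `v`: only the return address was pushed
  have hs0 : Mem.SameExcept [⟨(e.reg .rsp).toNat - 848, (e.reg .rsp).toNat - 152⟩] v.mem s_10a7c5.mem := by
    rw [w_mem_10a7c5]
    u_same
  have hrem0 : rem R s_10a7c5.mem = rem R v.mem := by
    apply rem_sameExcept hs0 (by omega)
    intro w hw
    have ew := List.mem_singleton.mp hw
    rw [ew]
    simp only
    omega
  have e_top : (s_10a7c5.reg .rsp).toNat + 8 = (e.reg .rsp).toNat - 152 := by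
    rw [w_rsp_10a7c5]
    u_omega
  -- the callee's footprint in terms of `v` (`w_same : SameExcept […] v.mem s_10a7c5r.mem`)
  v_after_call w_rsp_10a7c5 w_mem_10a7c5
  simp only [w_rsi_10a7c5, e_r13, hpv, hgif] at w_same
  -- THE SLOTS AND THE RETURN ADDRESS, over the pushed return address (first step) and through DGifGetLine's footprint (second step:
  -- the raster, pv's tables, `gif.Error`, the cursor, the stack below)
  have hp_r15 : s_10a7c5.mem.readLE (e.reg .rsp - 8) 8 = (e.reg .r15).toNat := by
    rw [w_mem_10a7c5]
    u_frame k_r15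
  rw [w_mem_10a7c5] at hp_r15
  have hs_r15 : s_10a7c5r.mem.readLE (e.reg .rsp - 8) 8 = (e.reg .r15).toNat := by u_frame hp_r15
  have hp_r14 : s_10a7c5.mem.readLE (e.reg .rsp - 16) 8 = (e.reg .r14).toNat := by
    rw [w_mem_10a7c5]
    u_frame k_r14
  rw [w_mem_10a7c5] at hp_r14
  have hs_r14 : s_10a7c5r.mem.readLE (e.reg .rsp - 16) 8 = (e.reg .r14).toNat := by u_frame hp_r14
  have hp_r13 : s_10a7c5.mem.readLE (e.reg .rsp - 24) 8 = (e.reg .r13).toNat := by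
    rw [w_mem_10a7c5]
    u_frame k_r13
  rw [w_mem_10a7c5] at hp_r13
  have hs_r13 : s_10a7c5r.mem.readLE (e.reg .rsp - 24) 8 = (e.reg .r13).toNat := by u_frame hp_r13
  have hp_r12 : s_10a7c5.mem.readLE (e.reg .rsp - 32) 8 = (e.reg .r12).toNat := by
    rw [w_mem_10a7c5]
    u_frame k_r12
  rw [w_mem_10a7c5] at hp_r12
  have hs_r12 : s_10a7c5r.mem.readLE (e.reg .rsp - 32) 8 = (e.reg .r12).toNat := by u_frame hp_r12
  have hp_rbp : s_10a7c5.mem.readLE (e.reg .rsp - 40) 8 = (e.reg .rbp).toNat := by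
    rw [w_mem_10a7c5]
    u_frame k_rbp
  rw [w_mem_10a7c5] at hp_rbp
  have hs_rbp : s_10a7c5r.mem.readLE (e.reg .rsp - 40) 8 = (e.reg .rbp).toNat := by u_frame hp_rbp
  have hp_rbx : s_10a7c5.mem.readLE (e.reg .rsp - 48) 8 = (e.reg .rbx).toNat := by
    rw [w_mem_10a7c5]
    u_frame k_rbx
  rw [w_mem_10a7c5] at hp_rbx
  have hs_rbx : s_10a7c5r.mem.readLE (e.reg .rsp - 48) 8 = (e.reg .rbx).toNat := by u_frame hp_rbx
  have hp_ra : UInt64.ofNat (s_10a7c5.mem.readLE (e.reg .rsp) 8) = ret := by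
    rw [w_mem_10a7c5]
    u_frame k_ra
  rw [w_mem_10a7c5] at hp_ra
  have hs_ra : UInt64.ofNat (s_10a7c5r.mem.readLE (e.reg .rsp) 8) = ret := by u_frame hp_ra
  -- the footprint since the entry: DGifGetLine's windows lie inside the function's (its stack; the heap's region; the cursor)
  have hsame1 : Mem.SameExcept
    [⟨(e.reg .rsp).toNat - 848, (e.reg .rsp).toNat⟩,
     shadowSpan ((e.reg .rsp).toNat - 152) ((e.reg .rsp).toNat - 56),
     ⟨0x800000, 0x1000020⟩,
     ⟨R.cur, R.cur + 8⟩] e.mem s_10a7c5r.mem := by u_same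
  -- the heap's invariant comes back with the clean stack at the callee's `rsp + 8` = the body's `rsp`
  have hinv1 : HeapInv Hc rest (DGifSlurp.framesIn frames e) ((e.reg .rsp).toNat - 152) s_10a7c5r.mem := by
    rw [← e_top]
    exact hback.inv
  have hrem1 : rem R s_10a7c5r.mem ≤ rem R v.mem := by
    rw [← hrem0]
    exact hback.rem
  -- THE EXIT ASSERTION: `Core` at `ret11` …
  have hcore1 : DGifSlurp.Core Gif.L.DGifSlurp.ret11 H rest frames F R u₀ e ret s_10a7c5r := {
    entry := hcore.entry
    pre := hcore.pre
    rip := w_rip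
    rsp := w_rsp
    rbp := (w_kept.get .rbp rfl).trans hcore.rbp
    r14 := (w_kept.get .r14 rfl).trans hcore.r14
    slot_r15 := hs_r15
    slot_r14 := hs_r14
    slot_r13 := hs_r13
    slot_r12 := hs_r12
    slot_rbp := hs_rbp
    slot_rbx := hs_rbx
    slot_ra := hs_ra
    rem := Nat.le_trans hrem1 hcore.rem
    same := hsame1
    code := w_code
    abi := w_inv
  }
  -- … and `IR` for the same heap and forest (`Back`): `LZOK` again, the same last image, `sp` still in `r12`
  -- (the result in `eax` is GIF_OK or GIF_ERROR: neither arm of the test behind needs to know which)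
  refine ReachVia.done ?_
  exact {
    at_ := {
      core := hcore1
      region := hreg
      gif := hgif
      pv := hpv
      inv := hinv1
      ok := hback.ok
    }
    lz := by
      rw [← hpv]
      exact hlz1
    last := ⟨s, init, g, r, n, hl, hras, (congrArg UInt64.toNat (w_kept.get .r12 rfl)).trans h_r12⟩
    lt := Nat.lt_of_le_of_lt hrem1 hlt
  }

/-- **10A7CAH (ret11) … 10A7D4H | 10A8EDH** (dgif_lib.c:1259-1262): `ebx = eax`, `test eax, eax ; je`. GIF_OK: to the move (10A7D4H),
nothing stored: `IR` again. GIF_ERROR (10A9C0H): `DGifDecreaseImageCounter(gif)` (the last image has no extension list: EX3), `jmp` to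
the epilogue (10A8EDH) with the heap and forest of its post: the counted images are `init`, all complete. -/
theorem seg6_seg_tail (Lay : Layout) (hLay : Lay.hi = 0x1000000) (μ : Microarch) (hμ : UserX.MicroOK μ) (u₀ : State)
    (hcode : HasCodeNat Lay u₀ Gif.L.DGifSlurp.entry Gif.Code.code_DGifSlurp.nat Gif.L.DGifSlurp.size)
    (H : Heap) (rest : List Obj) (frames : List (Nat × FrameLayout)) (F : Forest) (R : Rd) (Hc : Heap) (Fc : Forest) (m : Nat)
    (e : State) (ret : Word)
    (h_DGifDecreaseImageCounter : ∀ (init : List Img) (g : Img), Calls Lay μ ProgX.Base.WayInv (ProgX.Base.conv u₀)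
      Gif.L.DGifDecreaseImageCounter.entry
      (Gif.Spec.DGifDecreaseImageCounter.spec Hc rest (DGifSlurp.framesIn frames e) Fc R init g))
    (v : State) (hat : DGifSlurp.IR Gif.L.DGifSlurp.ret11 H rest frames F R Hc Fc m u₀ e ret v) :
    ReachVia Lay μ ProgX.Base.WayInv v (fun w =>
      DGifSlurp.IR Gif.L.DGifSlurp.at_10a7d4 H rest frames F R Hc Fc m u₀ e ret w ∨
      DGifSlurp.Exit H rest frames F R u₀ e ret w) := by
  -- THE PRELUDE: the entry assertion `IR` at `ret11`
  obtain ⟨hAt, hlz, hlast, hlt⟩ := hat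
  obtain ⟨hcore, hreg, hgif, hpv, hinv, hok⟩ := hAt
  obtain ⟨s, init, g, r, n, hl, hras, h_r12⟩ := hlast
  -- the callee's contract for the frame list of the body, the present heap and forest, and the last image
  have hdec := h_DGifDecreaseImageCounter init g
  have he := hcore.entry
  v_entry he
  obtain ⟨henv, hrdi, hcomplete⟩ := hcore.pre
  have w_rip := hcore.rip
  have c_rsp : v.reg .rsp = e.reg .rsp - 152 := hcore.rsp
  have c_rbp : v.reg .rbp = e.reg .rdi := hcore.rbp
  -- `eax` as a variable `z` (the branch fact of `test eax, eax` speaks of it)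
  obtain ⟨z, c_rax⟩ : ∃ z, v.reg .rax = z := ⟨_, rfl⟩
  have w_kept : RegsKept [.rsp] v v := RegsKept.refl _ _
  have w_eq : Mem.EqOn ProgX.Base.L.textLo ProgX.Base.L.textHi u₀.mem v.mem := ProgX.Base.conv_code_eqOn hcore.code
  have hdf := (show abiInv _ from hcore.abi).1
  have hmx := (show abiInv _ from hcore.abi).2
  have hsse := ProgX.Base.sseOK_of_abiInv hcore.abi
  have k_r15 : v.mem.readLE (e.reg .rsp - 8) 8 = (e.reg .r15).toNat := hcore.slot_r15
  have k_r14 : v.mem.readLE (e.reg .rsp - 16) 8 = (e.reg .r14).toNat := hcore.slot_r14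
  have k_r13 : v.mem.readLE (e.reg .rsp - 24) 8 = (e.reg .r13).toNat := hcore.slot_r13
  have k_r12 : v.mem.readLE (e.reg .rsp - 32) 8 = (e.reg .r12).toNat := hcore.slot_r12
  have k_rbp : v.mem.readLE (e.reg .rsp - 40) 8 = (e.reg .rbp).toNat := hcore.slot_rbp
  have k_rbx : v.mem.readLE (e.reg .rsp - 48) 8 = (e.reg .rbx).toNat := hcore.slot_rbx
  have k_ra : UInt64.ofNat (v.mem.readLE (e.reg .rsp) 8) = ret := hcore.slot_ra
  have hsame : Mem.SameExcept
    [⟨(e.reg .rsp).toNat - 848, (e.reg .rsp).toNat⟩,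
     shadowSpan ((e.reg .rsp).toNat - 152) ((e.reg .rsp).toNat - 56),
     ⟨0x800000, 0x1000020⟩,
     ⟨R.cur, R.cur + 8⟩] e.mem v.mem := hcore.same
  have hcur := henv.ctx.cursor_range henv.heap.inv.shadow
  -- THE WALK, both arms: to the move, or through the call to its return address
  u_walk hcode [hμ.vendor] until [Gif.L.DGifSlurp.at_10a7d4, Gif.L.DGifSlurp.at_10a8ed]
    span [ProgX.Base.L.textLo, ProgX.Base.L.textHi] side (v_side)
  case call_inv =>
    v_inv
  case pre_10a9c3 =>
    -- DGifDecreaseImageCounter'S PRECONDITION. The environment for the frame list with the own frame in front: only the return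
    -- address was pushed since `v`
    have hs : Mem.SameExcept [⟨(e.reg .rsp).toNat - 848, (e.reg .rsp).toNat - 152⟩] v.mem s_10a9c3.mem := by
      rw [w_mem]
      u_same
    have henv' : Env Hc rest (DGifSlurp.framesIn frames e) Fc R s_10a9c3 := by
      refine seg6_env_at_call henv hreg hinv hok hs (by omega) ?_ ?_ ?_
      · rw [w_rsp]
        u_omega
      · rw [w_rsp]
        u_omega
      · rw [w_rsp]
        u_omega
    -- the four clauses: `Env`, `rdi = gif`, the counted images end with `g`, EX3
    refine ⟨henv', ?_, ?_, hl.noext⟩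
    · rw [w_rdi, hgif]
      exact hrdi
    · unfold Forest.imgs
      rw [hl.saved]
      exact hl.imgs
  · -- GIF_ERROR. 0x10a9c8 (ret31): DGifDecreaseImageCounter HAS RETURNED. Its post: a heap `H'`, a forest `F'` that differs from
    -- `Fc` in `saved` only, whose counted images are `init`
    obtain ⟨H', F', hb2, hsbs, himgs, _hremeq⟩ := w_post
    have hs0 : Mem.SameExcept [⟨(e.reg .rsp).toNat - 848, (e.reg .rsp).toNat - 152⟩] v.mem s_10a9c3.mem := by
      rw [w_mem_10a9c3]
      u_same
    have hrem0 : rem R s_10a9c3.mem = rem R v.mem := by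
      apply rem_sameExcept hs0 (by omega)
      intro w hw
      have ew := List.mem_singleton.mp hw
      rw [ew]
      simp only
      omega
    have e_top : (s_10a9c3.reg .rsp).toNat + 8 = (e.reg .rsp).toNat - 152 := by
      rw [w_rsp_10a9c3]
      u_omega
    -- the callee's footprint in terms of `v`
    v_after_call w_rsp_10a9c3 w_mem_10a9c3
    -- THE SLOTS AND THE RETURN ADDRESS, over the pushed return address and through the callee's footprint (the heap's region and
    -- its shadow, the stack below)
    have hp_r15 : s_10a9c3.mem.readLE (e.reg .rsp - 8) 8 = (e.reg .r15).toNat := by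
      rw [w_mem_10a9c3]
      u_frame k_r15
    rw [w_mem_10a9c3] at hp_r15
    have hs_r15 : s_10a9c3r.mem.readLE (e.reg .rsp - 8) 8 = (e.reg .r15).toNat := by u_frame hp_r15
    have hp_r14 : s_10a9c3.mem.readLE (e.reg .rsp - 16) 8 = (e.reg .r14).toNat := by
      rw [w_mem_10a9c3]
      u_frame k_r14
    rw [w_mem_10a9c3] at hp_r14
    have hs_r14 : s_10a9c3r.mem.readLE (e.reg .rsp - 16) 8 = (e.reg .r14).toNat := by u_frame hp_r14
    have hp_r13 : s_10a9c3.mem.readLE (e.reg .rsp - 24) 8 = (e.reg .r13).toNat := by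
      rw [w_mem_10a9c3]
      u_frame k_r13
    rw [w_mem_10a9c3] at hp_r13
    have hs_r13 : s_10a9c3r.mem.readLE (e.reg .rsp - 24) 8 = (e.reg .r13).toNat := by u_frame hp_r13
    have hp_r12 : s_10a9c3.mem.readLE (e.reg .rsp - 32) 8 = (e.reg .r12).toNat := by
      rw [w_mem_10a9c3]
      u_frame k_r12
    rw [w_mem_10a9c3] at hp_r12
    have hs_r12 : s_10a9c3r.mem.readLE (e.reg .rsp - 32) 8 = (e.reg .r12).toNat := by u_frame hp_r12
    have hp_rbp : s_10a9c3.mem.readLE (e.reg .rsp - 40) 8 = (e.reg .rbp).toNat := by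
      rw [w_mem_10a9c3]
      u_frame k_rbp
    rw [w_mem_10a9c3] at hp_rbp
    have hs_rbp : s_10a9c3r.mem.readLE (e.reg .rsp - 40) 8 = (e.reg .rbp).toNat := by u_frame hp_rbp
    have hp_rbx : s_10a9c3.mem.readLE (e.reg .rsp - 48) 8 = (e.reg .rbx).toNat := by
      rw [w_mem_10a9c3]
      u_frame k_rbx
    rw [w_mem_10a9c3] at hp_rbx
    have hs_rbx : s_10a9c3r.mem.readLE (e.reg .rsp - 48) 8 = (e.reg .rbx).toNat := by u_frame hp_rbx
    have hp_ra : UInt64.ofNat (s_10a9c3.mem.readLE (e.reg .rsp) 8) = ret := by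
      rw [w_mem_10a9c3]
      u_frame k_ra
    rw [w_mem_10a9c3] at hp_ra
    have hs_ra : UInt64.ofNat (s_10a9c3r.mem.readLE (e.reg .rsp) 8) = ret := by u_frame hp_ra
    -- the footprint since the entry
    have hsame1 : Mem.SameExcept
      [⟨(e.reg .rsp).toNat - 848, (e.reg .rsp).toNat⟩,
       shadowSpan ((e.reg .rsp).toNat - 152) ((e.reg .rsp).toNat - 56),
       ⟨0x800000, 0x1000020⟩,
       ⟨R.cur, R.cur + 8⟩] e.mem s_10a9c3r.mem := by u_same
    -- 0x10a9c8: `jmp` to the epilogue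
    u_walk hcode [hμ.vendor] until [Gif.L.DGifSlurp.at_10a8ed] span [ProgX.Base.L.textLo, ProgX.Base.L.textHi] side (v_side)
    -- the heap's invariant comes back with the clean stack at the callee's `rsp + 8` = the body's `rsp`
    have hinv1 : HeapInv H' rest (DGifSlurp.framesIn frames e) ((e.reg .rsp).toNat - 152) s_10a9c3r.mem := by
      rw [← e_top]
      exact hb2.inv
    have hrem1 : rem R s_10a9c3r.mem ≤ rem R v.mem := by
      rw [← hrem0]
      exact hb2.rem
    -- every counted image of `F'` is one of `init`: complete (SV4)
    have hcomp : F'.Complete := by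
      rw [DGifSlurp.complete_iff_imgs, himgs]
      exact hl.done
    -- THE EXIT ASSERTION: `Done` at 0x10a8ed for the heap and the forest of the callee's post
    refine ReachVia.done (Or.inr ⟨H', F', ?_⟩)
    exact {
      at_ := {
        core := {
          entry := hcore.entry
          pre := hcore.pre
          rip := w_rip
          rsp := w_rsp
          rbp := (w_kept.get .rbp rfl).trans hcore.rbp
          r14 := (w_kept.get .r14 rfl).trans hcore.r14
          slot_r15 := by
            rw [w_mem]
            exact hs_r15
          slot_r14 := by
            rw [w_mem]
            exact hs_r14
          slot_r13 := by
            rw [w_mem]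
            exact hs_r13
          slot_r12 := by
            rw [w_mem]
            exact hs_r12
          slot_rbp := by
            rw [w_mem]
            exact hs_rbp
          slot_rbx := by
            rw [w_mem]
            exact hs_rbx
          slot_ra := by
            rw [w_mem]
            exact hs_ra
          rem := by
            rw [w_mem]
            exact Nat.le_trans hrem1 hcore.rem
          same := by
            rw [w_mem]
            exact hsame1
          code := ProgX.Base.conv_code_in w_eq
          abi := by
            refine ProgX.Base.abiInv_of ?_ ?_
            · rw [w_flags]
              exact w_df
            · rw [w_mxcsr]
              exact w_mx
        }
        region := hreg.trans hb2.region
        gif := hsbs.1.trans hgif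
        pv := hsbs.2.1.trans hpv
        inv := by
          rw [w_mem]
          exact hinv1
        ok := by
          rw [w_mem]
          exact hb2.ok
      }
      complete := hcomp
    }
  · -- GIF_OK. 0x10a7d4: nothing was stored since `v`: `IR` again, at the move
    refine ReachVia.done (Or.inl ?_)
    exact {
      at_ := {
        core := {
          entry := hcore.entry
          pre := hcore.pre
          rip := w_rip
          rsp := w_rsp
          rbp := (w_kept.get .rbp rfl).trans hcore.rbp
          r14 := (w_kept.get .r14 rfl).trans hcore.r14
          slot_r15 := by
            rw [w_mem]
            exact k_r15
          slot_r14 := by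
            rw [w_mem]
            exact k_r14
          slot_r13 := by
            rw [w_mem]
            exact k_r13
          slot_r12 := by
            rw [w_mem]
            exact k_r12
          slot_rbp := by
            rw [w_mem]
            exact k_rbp
          slot_rbx := by
            rw [w_mem]
            exact k_rbx
          slot_ra := by
            rw [w_mem]
            exact k_ra
          rem := by
            rw [w_mem]
            exact hcore.rem
          same := by
            rw [w_mem]
            exact hsame
          code := ProgX.Base.conv_code_in w_eq
          abi := by
            refine ProgX.Base.abiInv_of ?_ ?_
            · rw [w_flags]
              simp only [X86.User.df_setStatus]
              exact hdf
            · rw [w_mxcsr]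
              exact hmx
        }
        region := hreg
        gif := hgif
        pv := hpv
        inv := by
          rw [w_mem]
          exact hinv
        ok := by
          rw [w_mem]
          exact hok
      }
      lz := by
        rw [w_mem]
        exact hlz
      last := ⟨s, init, g, r, n, hl, hras, (congrArg UInt64.toNat (w_kept.get .r12 rfl)).trans h_r12⟩
      lt := by
        rw [w_mem]
        exact hlt
    }

end Gif.Spec.DGifSlurp_6
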